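-- pv_equiv track=rewrite | github.com/PythonGoesReddit/Reddit_MDA | Reddit_Bibers_Features.py | feature_54
-- ===== SOURCE A (Python) =====
-- def feature_54(untagged_list):
--     """This function takes a list of words without PoS tags as input and returns the number of items
--     that are predictive modals."""
--     counter = 0
--     predmodalslist = ["will", "would", "shall"]
--     for item in untagged_list:
--         if item in predmodalslist:
--             counter = counter + 1
--         else:
--             pass
--     return(counter)
-- ===== SOURCE B (Python) =====
-- def feature_54(untagged_list):
--     """This function takes a list of words without PoS tags as input and returns the number of items
--     that are predictive modals."""
--     return sum(untagged_list.count(w) for w in ("will", "would", "shall"))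
-- ===== Notes on version B (the rewrite author's own statement) =====
-- stated objective: idiomatic
-- what changed: Replaces the single scan with a per-item membership test and accumulator by three staged passes: it iterates over the three target modals and sums list.count of each, so the outer loop runs over the targets, not the data.
import Mathlib
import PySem

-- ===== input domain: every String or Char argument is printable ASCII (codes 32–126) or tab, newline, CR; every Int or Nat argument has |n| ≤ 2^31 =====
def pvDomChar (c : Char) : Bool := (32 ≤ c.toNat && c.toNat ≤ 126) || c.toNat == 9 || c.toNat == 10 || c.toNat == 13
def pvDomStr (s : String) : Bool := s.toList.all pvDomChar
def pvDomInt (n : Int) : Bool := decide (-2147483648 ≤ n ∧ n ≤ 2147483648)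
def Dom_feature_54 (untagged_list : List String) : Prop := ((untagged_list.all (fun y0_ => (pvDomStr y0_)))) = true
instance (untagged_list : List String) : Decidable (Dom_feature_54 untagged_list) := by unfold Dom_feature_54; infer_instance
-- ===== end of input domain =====

-- B: three staged list.count passes over the target modals instead of A's single scan with a membership test (idiomatic, same cost).
-- ===== PORT A =====
def feature_54 (untagged_list : List String) : Int :=
  let predmodalslist : List String := ["will", "would", "shall"]
  untagged_list.foldl (fun counter item => if item ∈ predmodalslist then counter + 1 else counter) 0

-- ===== PORT B =====
def feature_54_alt (untagged_list : List String) : Int :=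
  (["will", "would", "shall"] : List String).foldl
    (fun acc w => acc + PySem.List.count untagged_list w) 0

-- ===== PRECONDITION & SPEC =====
def Spec_feature_54 (untagged_list : List String) (out : Int) : Prop := out = feature_54_alt untagged_list
instance (untagged_list : List String) (out : Int) : Decidable (Spec_feature_54 untagged_list out) := by unfold Spec_feature_54; infer_instance

-- ===== CLAIM (what is proved, stated in full; the proofs are below) =====
def Claim_equal_feature_54 : Prop := ∀ (untagged_list : List String), Dom_feature_54 untagged_list → Spec_feature_54 untagged_list (feature_54 untagged_list)

-- ===== LEMMAS AND PROOFS =====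

-- ===== VERDICT (by name: the statement is the Claim_ definition above) =====
lemma feature_54_loop (xs : List String) (acc : Int) :
    xs.foldl (fun counter item => if item ∈ (["will", "would", "shall"] : List String) then counter + 1 else counter) acc
      = acc + xs.count "will" + xs.count "would" + xs.count "shall" := by
  induction xs generalizing acc with
  | nil => simp
  | cons x xs ih =>
    simp only [List.foldl_cons, ih, List.count_cons]
    by_cases h : x ∈ (["will", "would", "shall"] : List String)
    · simp only [if_pos h]
      fin_cases h <;> simp <;> ring
    · simp only [if_neg h]
      simp only [List.mem_cons, not_or] at h
      obtain ⟨h1, h2, h3⟩ := h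
      simp [beq_iff_eq, h1, h2, h3, Ne.symm]

theorem feature_54_spec : Claim_equal_feature_54 := by
  intro xs _
  unfold Spec_feature_54 feature_54 feature_54_alt
  simp only [List.foldl_cons, List.foldl_nil, PySem.List.count_eq, feature_54_loop]
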